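-- pv_equiv track=rewrite | github.com/MamdouhAlShamy/HackerRank | 30DaysOfCode/day11.py | detectAllHourglassStartingIndexes
-- ===== SOURCE A (Python) =====
-- def isItInAreaOfOtherHourglass(foundHourglassStartingIndex, index):
-- 	for f in foundHourglassStartingIndex:
-- 		if index[0] >= f[0] and index[0] <= f[0]+2 \
-- 		and index[1] >= f[1] and index[1] <= f[1]+2:
-- 			return True
-- 	return False
--
-- def detectAllHourglassStartingIndexes(playground):
-- 	hourglassStartingIndexes = []
-- 	for i in range(len(playground)):
-- 		for j in range(len(playground[0])):
-- 			if playground[i][j] != 0: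
-- 				if not isItInAreaOfOtherHourglass(hourglassStartingIndexes, [i,j]):
-- 					hourglassStartingIndexes.append([i,j])
-- 	return hourglassStartingIndexes
-- ===== SOURCE B (Python) =====
-- def detectAllHourglassStartingIndexes(playground):
--     width = len(playground[0]) if playground else 0
--     cells = [(i, j) for i in range(len(playground)) for j in range(width)
--              if playground[i][j] != 0]
--     starts = []
--     while cells:
--         i, j = cells[0]
--         starts.append([i, j])
--         cells = [(r, c) for (r, c) in cells[1:]
--                  if not (i <= r <= i + 2 and j <= c <= j + 2)]
--     return starts
-- ===== Notes on version B (the rewrite author's own statement) =====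
-- stated objective: alternative
-- what changed: B first collects the nonzero cell coordinates in one pass, then runs a separate greedy loop that takes the head of the worklist as the next start and filters the whole remaining worklist of every cell inside its 3x3 box, instead of A's single scan that tests each cell backwards against the list of accepted starts.
import Mathlib
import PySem

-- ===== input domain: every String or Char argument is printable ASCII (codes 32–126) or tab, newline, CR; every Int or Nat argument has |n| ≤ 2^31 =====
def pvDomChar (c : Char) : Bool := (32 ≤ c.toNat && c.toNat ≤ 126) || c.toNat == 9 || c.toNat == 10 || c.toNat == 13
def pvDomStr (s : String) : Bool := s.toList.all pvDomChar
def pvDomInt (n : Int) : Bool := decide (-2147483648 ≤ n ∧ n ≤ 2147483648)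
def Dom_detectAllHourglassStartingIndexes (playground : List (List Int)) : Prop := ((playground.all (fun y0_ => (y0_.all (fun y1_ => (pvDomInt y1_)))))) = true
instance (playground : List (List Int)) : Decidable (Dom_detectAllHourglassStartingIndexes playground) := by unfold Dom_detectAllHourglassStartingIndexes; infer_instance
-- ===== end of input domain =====

-- B restructures A's single suppression-scan into two stages: collect all nonzero cell
-- coordinates once, then a greedy worklist loop that takes the head as the next start and
-- filters the remaining worklist of its whole 3x3 box (alternative decomposition, same results).


-- ===== PORT A =====
def isItInAreaOfOtherHourglass (foundHourglassStartingIndex : List (List Int)) (index : List Int) : Bool :=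
  match foundHourglassStartingIndex with
  | [] => false
  | f :: fs =>
    if PySem.List.pyGetD index 0 0 ≥ PySem.List.pyGetD f 0 0 ∧
       PySem.List.pyGetD index 0 0 ≤ PySem.List.pyGetD f 0 0 + 2 ∧
       PySem.List.pyGetD index 1 0 ≥ PySem.List.pyGetD f 1 0 ∧
       PySem.List.pyGetD index 1 0 ≤ PySem.List.pyGetD f 1 0 + 2 then
      true
    else
      isItInAreaOfOtherHourglass fs index

def detectAllHourglassStartingIndexes (playground : List (List Int)) : List (List Int) :=
  (PySem.List.pyRange 0 playground.length 1).foldl (fun acc i =>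
    (PySem.List.pyRange 0 ((PySem.List.pyGetD playground 0 []).length : Int) 1).foldl (fun acc j =>
      if PySem.List.pyGetD (PySem.List.pyGetD playground i []) j 0 ≠ 0 then
        if ¬ (isItInAreaOfOtherHourglass acc [i, j] = true) then acc ++ [[i, j]] else acc
      else acc) acc) []

-- ===== PORT B =====
-- the box-membership test of B's comprehension filter: i <= r <= i+2 and j <= c <= j+2
def pvBoxb (i j : Int) (p : Int × Int) : Bool :=
  decide (i ≤ p.1) && decide (p.1 ≤ i + 2) && decide (j ≤ p.2) && decide (p.2 ≤ j + 2)

-- the while-loop of B: pop the head as the next start, filter its 3x3 box out of the worklist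
def pvGreedy : List (Int × Int) → List (List Int)
  | [] => []
  | (i, j) :: rest =>
    [i, j] :: pvGreedy (rest.filter (fun p => ! pvBoxb i j p))
termination_by l => l.length
decreasing_by simpa using Nat.lt_succ_of_le (le_trans (List.length_filter_le _ _) (by simp))

def detectAllHourglassStartingIndexes_alt (playground : List (List Int)) : List (List Int) :=
  let width : Int := match playground with | [] => 0 | r :: _ => (r.length : Int)
  pvGreedy ((PySem.List.pyRange 0 playground.length 1).flatMap (fun i =>
    ((PySem.List.pyRange 0 width 1).filter (fun j =>
      PySem.List.pyGetD (PySem.List.pyGetD playground i []) j 0 != 0)).map (fun j => (i, j))))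

-- ===== PRECONDITION & SPEC =====
-- Pre_ excludes ragged grids with a row shorter than row 0: there Python A raises IndexError
-- on playground[i][j] (and B raises the same way while collecting the nonzero cells).
def Pre_detectAllHourglassStartingIndexes (playground : List (List Int)) : Prop :=
  ∀ row ∈ playground, (PySem.List.pyGetD playground 0 []).length ≤ row.length
instance (playground : List (List Int)) : Decidable (Pre_detectAllHourglassStartingIndexes playground) := by unfold Pre_detectAllHourglassStartingIndexes; infer_instance

def pvWitness_detectAllHourglassStartingIndexes : List (List Int) := [[1, 0, 0], [0, 0, 2], [0, 3, 0]]

def Spec_detectAllHourglassStartingIndexes (playground : List (List Int)) (out : List (List Int)) : Prop := out = detectAllHourglassStartingIndexes_alt playground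
instance (playground : List (List Int)) (out : List (List Int)) : Decidable (Spec_detectAllHourglassStartingIndexes playground out) := by unfold Spec_detectAllHourglassStartingIndexes; infer_instance

-- ===== CLAIM =====
def Claim_equal_detectAllHourglassStartingIndexes : Prop := ∀ (playground : List (List Int)), Dom_detectAllHourglassStartingIndexes playground → Pre_detectAllHourglassStartingIndexes playground → Spec_detectAllHourglassStartingIndexes playground (detectAllHourglassStartingIndexes playground)

-- ===== LEMMAS AND PROOFS =====

-- the 3x3 box test A performs per found start f
def inBox (f : List Int) (p : Int × Int) : Prop :=
  PySem.List.pyGetD f 0 0 ≤ p.1 ∧ p.1 ≤ PySem.List.pyGetD f 0 0 + 2 ∧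
  PySem.List.pyGetD f 1 0 ≤ p.2 ∧ p.2 ≤ PySem.List.pyGetD f 1 0 + 2

lemma isItIn_iff (fs : List (List Int)) (i j : Int) :
    isItInAreaOfOtherHourglass fs [i, j] = true ↔ ∃ f ∈ fs, inBox f (i, j) := by
  induction fs with
  | nil => simp [isItInAreaOfOtherHourglass]
  | cons f fs ih =>
    simp only [isItInAreaOfOtherHourglass]
    by_cases h : PySem.List.pyGetD [i, j] 0 0 ≥ PySem.List.pyGetD f 0 0 ∧
       PySem.List.pyGetD [i, j] 0 0 ≤ PySem.List.pyGetD f 0 0 + 2 ∧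
       PySem.List.pyGetD [i, j] 1 0 ≥ PySem.List.pyGetD f 1 0 ∧
       PySem.List.pyGetD [i, j] 1 0 ≤ PySem.List.pyGetD f 1 0 + 2
    · simp only [if_pos h]
      have hi : PySem.List.pyGetD [i, j] 0 0 = i := by rfl
      have hj : PySem.List.pyGetD [i, j] 1 0 = j := by rfl
      rw [hi, hj] at h
      constructor
      · intro _; exact ⟨f, List.mem_cons_self, h.1, h.2.1, h.2.2.1, h.2.2.2⟩
      · intro _; trivial
    · simp only [if_neg h, ih]
      have hi : PySem.List.pyGetD [i, j] 0 0 = i := by rfl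
      have hj : PySem.List.pyGetD [i, j] 1 0 = j := by rfl
      rw [hi, hj] at h
      constructor
      · intro ⟨g, hg, hb⟩; exact ⟨g, List.mem_cons_of_mem _ hg, hb⟩
      · rintro ⟨g, hg, hb⟩
        rcases List.mem_cons.mp hg with rfl | hg'
        · exact absurd ⟨hb.1, hb.2.1, hb.2.2.1, hb.2.2.2⟩ h
        · exact ⟨g, hg', hb⟩

-- Bool form of A's coverage test, on a coordinate pair
def covB (S : List (List Int)) (p : Int × Int) : Bool :=
  isItInAreaOfOtherHourglass S [p.1, p.2]

lemma covB_append (S : List (List Int)) (i j : Int) (p : Int × Int) :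
    covB (S ++ [[i, j]]) p = (covB S p || pvBoxb i j p) := by
  have hi : PySem.List.pyGetD [i, j] 0 0 = i := by rfl
  have hj : PySem.List.pyGetD [i, j] 1 0 = j := by rfl
  rcases p with ⟨r, c⟩
  apply Bool.eq_iff_iff.mpr
  simp only [covB, Bool.or_eq_true, isItIn_iff, List.mem_append, List.mem_singleton, pvBoxb,
    Bool.and_eq_true, decide_eq_true_eq]
  constructor
  · rintro ⟨f, hf | rfl, hb⟩
    · exact Or.inl ⟨f, hf, hb⟩
    · unfold inBox at hb; rw [hi, hj] at hb
      exact Or.inr ⟨⟨⟨hb.1, hb.2.1⟩, hb.2.2.1⟩, hb.2.2.2⟩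
  · rintro (⟨f, hf, hb⟩ | ⟨⟨⟨h1, h2⟩, h3⟩, h4⟩)
    · exact ⟨f, Or.inl hf, hb⟩
    · refine ⟨[i, j], Or.inr rfl, ?_⟩
      unfold inBox; rw [hi, hj]; exact ⟨h1, h2, h3, h4⟩

-- A's per-cell step, on a coordinate pair
def stepA (acc : List (List Int)) (p : Int × Int) : List (List Int) :=
  if ¬ (isItInAreaOfOtherHourglass acc [p.1, p.2] = true) then acc ++ [[p.1, p.2]] else acc

-- main simulation: A's fold over a cell worklist = accumulated starts ++ B's greedy loop
-- on the worklist with the cells already covered by the accumulator filtered out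
lemma greedy_sim : ∀ (n : Nat) (L : List (Int × Int)) (S : List (List Int)), L.length ≤ n →
    List.foldl stepA S L = S ++ pvGreedy (L.filter (fun p => ! covB S p)) := by
  intro n
  induction n with
  | zero =>
    intro L S hL
    rw [List.length_eq_zero_iff.mp (Nat.le_zero.mp hL)]
    simp [pvGreedy]
  | succ n ih =>
    intro L S hL
    match L with
    | [] => simp [pvGreedy]
    | (i, j) :: L' =>
      simp only [List.foldl_cons, List.filter_cons]
      by_cases h : covB S (i, j) = true
      · have hstep : stepA S (i, j) = S := by
          unfold stepA; rw [if_neg]; simp only [covB] at h; simp [h]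
        rw [hstep, h]
        simp only [Bool.not_true]
        rw [if_neg (by simp)]
        exact ih L' S (Nat.le_of_succ_le_succ hL)
      · have h' : covB S (i, j) = false := Bool.eq_false_iff.mpr h
        have hstep : stepA S (i, j) = S ++ [[i, j]] := by
          unfold stepA; rw [if_pos]; simp only [covB] at h; simp [h]
        rw [hstep, h']
        simp only [Bool.not_false]
        rw [if_pos trivial]
        rw [ih L' (S ++ [[i, j]]) (Nat.le_of_succ_le_succ hL)]
        conv_rhs => rw [pvGreedy]
        rw [List.filter_filter, List.append_assoc, List.singleton_append]
        congr 2
        congr 1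
        apply List.filter_congr
        intro p _
        rw [covB_append]
        cases covB S p <;> cases pvBoxb i j p <;> rfl

-- two folds with pointwise-equal step functions agree
lemma foldl_congr_fun {a b : Type} {f g : a -> b -> a} {l : List b}
    (h : forall acc x, f acc x = g acc x) : forall {init : a}, l.foldl f init = l.foldl g init := by
  induction l with
  | nil => intro init; rfl
  | cons x xs ih => intro init; rw [List.foldl_cons, List.foldl_cons, h]; exact ih

-- A's nested range fold, for an arbitrary width w, equals B's collect-then-greedy pipeline
lemma main_eq (pg : List (List Int)) (w : Int) :
    (PySem.List.pyRange 0 pg.length 1).foldl (fun acc i =>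
      (PySem.List.pyRange 0 w 1).foldl (fun acc j =>
        if PySem.List.pyGetD (PySem.List.pyGetD pg i []) j 0 ≠ 0 then
          if ¬ (isItInAreaOfOtherHourglass acc [i, j] = true) then acc ++ [[i, j]] else acc
        else acc) acc) []
    = pvGreedy ((PySem.List.pyRange 0 pg.length 1).flatMap (fun i =>
        ((PySem.List.pyRange 0 w 1).filter (fun j =>
          PySem.List.pyGetD (PySem.List.pyGetD pg i []) j 0 != 0)).map (fun j => (i, j)))) := by
  have hA : (PySem.List.pyRange 0 pg.length 1).foldl (fun acc i =>
      (PySem.List.pyRange 0 w 1).foldl (fun acc j =>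
        if PySem.List.pyGetD (PySem.List.pyGetD pg i []) j 0 ≠ 0 then
          if ¬ (isItInAreaOfOtherHourglass acc [i, j] = true) then acc ++ [[i, j]] else acc
        else acc) acc) []
      = List.foldl stepA ([] : List (List Int))
        ((PySem.List.pyRange 0 pg.length 1).flatMap (fun i =>
          ((PySem.List.pyRange 0 w 1).filter (fun j =>
            PySem.List.pyGetD (PySem.List.pyGetD pg i []) j 0 != 0)).map (fun j => (i, j)))) := by
    rw [List.foldl_flatMap]
    apply foldl_congr_fun
    intro acc i
    rw [List.foldl_map, List.foldl_filter]
    apply foldl_congr_fun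
    intro acc' j
    by_cases hnz : PySem.List.pyGetD (PySem.List.pyGetD pg i []) j 0 ≠ 0
    · have hb : (PySem.List.pyGetD (PySem.List.pyGetD pg i []) j 0 != 0) = true := by
        simpa using hnz
      rw [if_pos hnz, if_pos hb]; rfl
    · have hb : ¬ ((PySem.List.pyGetD (PySem.List.pyGetD pg i []) j 0 != 0) = true) := by
        simpa using hnz
      rw [if_neg hnz, if_neg hb]
  rw [hA, greedy_sim _ _ [] le_rfl]
  have hf : (fun p => ! covB ([] : List (List Int)) p) = fun _ => true := by
    funext p; rfl
  rw [hf, List.filter_true, List.nil_append]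

-- ===== VERDICT =====
theorem detectAllHourglassStartingIndexes_spec : Claim_equal_detectAllHourglassStartingIndexes := by
  intro pg _ _
  unfold Spec_detectAllHourglassStartingIndexes
  cases pg with
  | nil => exact main_eq [] 0
  | cons r rest =>
    have h0 : ((PySem.List.pyGetD (r :: rest) 0 []).length : Int) = (r.length : Int) := by
      norm_num [PySem.List.pyGetD, PySem.List.pyGet?, PySem.List.pyIdx?]
    unfold detectAllHourglassStartingIndexes detectAllHourglassStartingIndexes_alt
    rw [h0]
    exact main_eq (r :: rest) ((r.length : Nat) : Int)
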